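-- pv_equiv track=rewrite | github.com/h0axyboi/practice-scripts | competitive coding/sherlock_and_valid_strings.py | valid_or_not
-- ===== SOURCE A (Python) =====
-- def valid_or_not(s):
--     d={}
--     for c in s:
--         d[c]=d.get(c,0)+1
--     freq={}
--     for key,value in d.items():
--         freq[value]=freq.get(value,0)+1
--     if len(freq)==1:
--         return 'YES'
--     if len(freq)==2:
--         x=list(freq.keys())
--         y=list(freq.values())
--         a=x[0]
--         b=x[1]
--         c=y[0]
--         d=y[1]
--         if (a==1 and c==1) or (b==1 and d==1):
--             return 'YES'
--         if (c==1 and a==b+1) or (d==1 and b==a+1):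
--             return 'YES'
--     return 'NO'
-- ===== SOURCE B (Python) =====
-- def valid_or_not(s):
--     counts = sorted(s.count(c) for c in set(s))
--     if not counts:
--         return 'NO'
--     lo, hi = counts[0], counts[-1]
--     if lo == hi:
--         return 'YES'
--     if lo == 1 and counts[1] == hi:
--         return 'YES'
--     if hi == lo + 1 and counts[-2] == lo:
--         return 'YES'
--     return 'NO'
-- ===== Notes on version B (the rewrite author's own statement) =====
-- stated objective: simpler
-- what changed: B replaces A's frequency-of-frequencies dict and its key/value list unpacking with a sorted list of character counts inspected at its endpoints (all equal; one extra count of 1 at the front; one count of hi=lo+1 at the back).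
import Mathlib
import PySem

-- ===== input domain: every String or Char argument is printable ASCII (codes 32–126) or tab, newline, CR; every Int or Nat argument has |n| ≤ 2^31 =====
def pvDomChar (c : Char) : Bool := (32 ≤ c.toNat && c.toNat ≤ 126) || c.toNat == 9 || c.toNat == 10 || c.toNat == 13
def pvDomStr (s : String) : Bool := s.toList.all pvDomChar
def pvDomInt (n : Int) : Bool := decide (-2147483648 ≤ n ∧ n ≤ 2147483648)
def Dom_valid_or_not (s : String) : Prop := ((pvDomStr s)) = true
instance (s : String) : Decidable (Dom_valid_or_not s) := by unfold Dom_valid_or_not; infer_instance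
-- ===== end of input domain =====

-- B replaces A's frequency-of-frequencies dict and its key/value unpacking with sorted
-- character counts inspected at their endpoints (objective: simpler).

-- ===== PORT A =====
def valid_or_not (s : String) : String :=
  -- d[c] = d.get(c, 0) + 1 over the characters of s
  let d : PySem.Dict Char Int :=
    s.toList.foldl (fun d c => d.insert c (d.getD c 0 + 1)) PySem.Dict.empty
  -- freq[value] = freq.get(value, 0) + 1 over the items of d
  let freq : PySem.Dict Int Int :=
    d.items.foldl (fun f kv => f.insert kv.2 (f.getD kv.2 0 + 1)) PySem.Dict.empty
  if freq.size = 1 then "YES"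
  else if freq.size = 2 then
    -- x = list(freq.keys()); y = list(freq.values()); a = x[0]; b = x[1]; c = y[0]; d = y[1]
    -- (the match on the two items is exactly that unpacking: under size = 2 Python's
    -- indexing cannot raise, and the fallthrough branch is unreachable)
    match freq.items with
    | [(a, c), (b, dd)] =>
      if (a = 1 ∧ c = 1) ∨ (b = 1 ∧ dd = 1) then "YES"
      else if (c = 1 ∧ a = b + 1) ∨ (dd = 1 ∧ b = a + 1) then "YES"
      else "NO"
    | _ => "NO"
  else "NO"

-- ===== PORT B =====
def valid_or_not_alt (s : String) : String :=
  -- counts = sorted(s.count(c) for c in set(s)) : set(s) is iterated in an unmodelled hash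
  -- order in Python, but sorted() without a key makes the result order-independent, so the
  -- first-insertion order of PySem.Set.ofList is exact here; s.count(c) for a single
  -- character c is exactly the character count.
  let counts : List Int :=
    PySem.List.sorted ((PySem.Set.ofList s.toList).map (fun c => (s.toList.count c : Int)))
      (fun x => x) false
  if counts = [] then "NO"
  else
    let lo := PySem.List.pyGetD counts 0 0
    let hi := PySem.List.pyGetD counts (-1) 0
    if lo = hi then "YES"
    else if lo = 1 ∧ PySem.List.pyGetD counts 1 0 = hi then "YES"
    else if hi = lo + 1 ∧ PySem.List.pyGetD counts (-2) 0 = lo then "YES"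
    else "NO"

-- ===== PRECONDITION & SPEC =====
def Spec_valid_or_not (s : String) (out : String) : Prop := out = valid_or_not_alt s
instance (s : String) (out : String) : Decidable (Spec_valid_or_not s out) := by unfold Spec_valid_or_not; infer_instance

-- ===== CLAIM (what is proved, stated in full; the proofs are below) =====
def Claim_equal_valid_or_not : Prop := ∀ (s : String), Dom_valid_or_not s → Spec_valid_or_not s (valid_or_not s)

-- ===== LEMMAS AND PROOFS =====

-- the branch logic of port A, as a function of the freq dict
def pvDecA (freq : PySem.Dict Int Int) : String :=
  if freq.size = 1 then "YES"
  else if freq.size = 2 then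
    match freq.items with
    | [(a, c), (b, dd)] =>
      if (a = 1 ∧ c = 1) ∨ (b = 1 ∧ dd = 1) then "YES"
      else if (c = 1 ∧ a = b + 1) ∨ (dd = 1 ∧ b = a + 1) then "YES"
      else "NO"
    | _ => "NO"
  else "NO"

-- the branch logic of port B, as a function of the sorted counts list
def pvDecB (counts : List Int) : String :=
  if counts = [] then "NO"
  else
    let lo := PySem.List.pyGetD counts 0 0
    let hi := PySem.List.pyGetD counts (-1) 0
    if lo = hi then "YES"
    else if lo = 1 ∧ PySem.List.pyGetD counts 1 0 = hi then "YES"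
    else if hi = lo + 1 ∧ PySem.List.pyGetD counts (-2) 0 = lo then "YES"
    else "NO"

-- the list of character counts both ports compute
def pvVals (s : String) : List Int :=
  (PySem.Set.ofList s.toList).map (fun c => (s.toList.count c : Int))

lemma pvA_eq (s : String) : valid_or_not s = pvDecA (PySem.Dict.counter (pvVals s)) := by
  have hd : s.toList.foldl (fun d c => d.insert c (d.getD c 0 + 1)) PySem.Dict.empty
      = PySem.Dict.counter s.toList := PySem.Dict.foldl_insert_getD_add_one_eq_counter _
  have hfreq :
      (PySem.Dict.counter s.toList).items.foldl
        (fun f kv => f.insert kv.2 (f.getD kv.2 0 + 1)) PySem.Dict.empty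
      = PySem.Dict.counter (pvVals s) := by
    rw [PySem.Dict.items_counter, List.foldl_map,
      ← PySem.Dict.foldl_insert_getD_add_one_eq_counter, pvVals, List.foldl_map]
  show pvDecA ((s.toList.foldl (fun d c => d.insert c (d.getD c 0 + 1))
      PySem.Dict.empty).items.foldl (fun f kv => f.insert kv.2 (f.getD kv.2 0 + 1))
      PySem.Dict.empty) = _
  rw [hd, hfreq]

lemma pvB_eq (s : String) :
    valid_or_not_alt s = pvDecB (PySem.List.sorted (pvVals s) (fun x => x) false) := rfl

-- a list with at most the two values lo < hi sorts to a block of lo's then a block of hi's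
lemma pvSortedTwo (vals : List Int) (lo hi : Int) (hlt : lo < hi)
    (h : ∀ x ∈ vals, x = lo ∨ x = hi) :
    PySem.List.sorted vals (fun x => x) false
      = List.replicate (vals.count lo) lo ++ List.replicate (vals.count hi) hi := by
  apply PySem.List.eq_of_perm_of_pairwise_le_of_injective (fun x => x) (fun _ _ h => h)
  · refine (PySem.List.sorted_perm _ _ _).trans (List.perm_iff_count.mpr ?_)
    intro x
    rw [List.count_append, List.count_replicate, List.count_replicate]
    by_cases hx1 : x = lo
    · simp [hx1, hlt.ne']
    · by_cases hx2 : x = hi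
      · simp [hx2, hlt.ne]
      · have hnm : x ∉ vals := fun hm => by rcases h x hm with rfl | rfl <;> simp_all
        simp [List.count_eq_zero.mpr hnm, Ne.symm hx1, Ne.symm hx2]
  · simpa using PySem.List.sorted_pairwise vals (fun x => x)
  · refine List.pairwise_append.mpr ⟨?_, ?_, ?_⟩
    · rw [List.pairwise_replicate]; right; exact le_refl lo
    · rw [List.pairwise_replicate]; right; exact le_refl hi
    · intro x hx y hy
      rw [List.eq_of_mem_replicate hx, List.eq_of_mem_replicate hy]
      omega

-- B's branch logic on such a two-block list, as a condition on the block sizes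
lemma pvTwo (lo hi : Int) (clo chi : Nat) (hlt : lo < hi) (hclo : 1 ≤ clo) (hchi : 1 ≤ chi) :
    pvDecB (List.replicate clo lo ++ List.replicate chi hi)
      = if (lo = 1 ∧ clo = 1) ∨ (hi = lo + 1 ∧ chi = 1) then "YES" else "NO" := by
  have hlen : (List.replicate clo lo ++ List.replicate chi hi).length = clo + chi := by simp
  have hne : (List.replicate clo lo ++ List.replicate chi hi) ≠ [] := by
    intro hn; have := congrArg List.length hn; rw [hlen] at this; simp at this; omega
  have hlo : PySem.List.pyGetD (List.replicate clo lo ++ List.replicate chi hi) 0 0 = lo := by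
    rw [PySem.List.pyGetD_eq_getElem _ 0 (by omega) (by rw [hlen]; push_cast; omega)]
    rw [List.getElem_append_left (by simp; omega)]
    exact List.getElem_replicate _
  have hhi : PySem.List.pyGetD (List.replicate clo lo ++ List.replicate chi hi) (-1) 0 = hi := by
    rw [PySem.List.pyGetD_neg_ofNat _ 1 0 (by omega) (by rw [hlen]; omega)]
    rw [List.getElem_append_right (by simp; omega)]
    exact List.getElem_replicate _
  have h1 : PySem.List.pyGetD (List.replicate clo lo ++ List.replicate chi hi) 1 0
      = if clo = 1 then hi else lo := by
    rw [PySem.List.pyGetD_eq_getElem _ 0 (by omega) (by rw [hlen]; push_cast; omega)]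
    by_cases hc1 : clo = 1
    · rw [if_pos hc1]
      rw [List.getElem_append_right (by simp [hc1])]
      exact List.getElem_replicate _
    · rw [if_neg hc1]
      rw [List.getElem_append_left (by simp; omega)]
      exact List.getElem_replicate _
  have h2 : PySem.List.pyGetD (List.replicate clo lo ++ List.replicate chi hi) (-2) 0
      = if chi = 1 then lo else hi := by
    rw [PySem.List.pyGetD_neg_ofNat _ 2 0 (by omega) (by rw [hlen]; omega)]
    by_cases hc1 : chi = 1
    · rw [if_pos hc1]
      rw [List.getElem_append_left (by simp [hc1]; omega)]
      exact List.getElem_replicate _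
    · rw [if_neg hc1]
      rw [List.getElem_append_right (by simp; omega)]
      exact List.getElem_replicate _
  have e1 : ((if clo = 1 then hi else lo) = hi) ↔ clo = 1 := by
    split_ifs with h <;> constructor <;> intro <;> omega
  have e2 : ((if chi = 1 then lo else hi) = lo) ↔ chi = 1 := by
    split_ifs with h <;> constructor <;> intro <;> omega
  unfold pvDecB
  rw [if_neg hne]
  simp only [hlo, hhi, h1, h2, e1, e2]
  rw [if_neg (by omega : ¬ lo = hi)]
  split_ifs <;> tauto

lemma pvKey (vals : List Int) (hpos : ∀ v ∈ vals, 1 ≤ v) :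
    pvDecA (PySem.Dict.counter vals) = pvDecB (PySem.List.sorted vals (fun x => x) false) := by
  have hitems : (PySem.Dict.counter vals).items
      = (PySem.Set.ofList vals).map (fun k => (k, (vals.count k : Int))) :=
    PySem.Dict.items_counter vals
  have hsize : (PySem.Dict.counter vals).size = (PySem.Set.ofList vals).length := by
    simp [PySem.Dict.size, hitems]
  have hmem : ∀ x ∈ vals, x ∈ PySem.Set.ofList vals := by
    intro x hx; exact (PySem.Set.mem_ofList _ _).mpr hx
  have hmem' : ∀ x ∈ PySem.Set.ofList vals, x ∈ vals := by
    intro x hx; exact (PySem.Set.mem_ofList _ _).mp hx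
  have hnd : (PySem.Set.ofList vals).Nodup := PySem.Set.nodup_ofList vals
  rcases hS : PySem.Set.ofList vals with _ | ⟨a, _ | ⟨b, _ | ⟨c, t⟩⟩⟩ <;>
    rw [hS] at hitems hsize hmem hmem' hnd
  · -- no values at all: the string is empty, both sides return "NO"
    have hv : vals = [] := by
      cases vals with
      | nil => rfl
      | cons x xs => exact absurd (hmem x (by simp)) (by simp)
    subst hv; decide
  · -- a single distinct count: A sees len(freq) = 1, B sees lo = hi
    have hone : ∀ x ∈ vals, x = a := fun x hx => by simpa using hmem x hx
    have hvne : vals ≠ [] := by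
      intro h; subst h; simpa using hmem' a (by simp)
    have hcsne : PySem.List.sorted vals (fun x => x) false ≠ [] := by
      rw [Ne, PySem.List.sorted_eq_nil_iff]; exact hvne
    have hm : ∀ x ∈ PySem.List.sorted vals (fun x => x) false, x = a := by
      intro x hx; exact hone x ((PySem.List.mem_sorted _ _ _ _).mp hx)
    have hlo : PySem.List.pyGetD (PySem.List.sorted vals (fun x => x) false) 0 0 = a := by
      cases hcs2 : PySem.List.sorted vals (fun x => x) false with
      | nil => exact absurd hcs2 hcsne
      | cons y ys =>
        rw [PySem.List.pyGetD_zero_cons]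
        exact hm y (by rw [hcs2]; simp)
    have hhi : PySem.List.pyGetD (PySem.List.sorted vals (fun x => x) false) (-1) 0 = a := by
      rw [PySem.List.pyGetD_neg_one _ 0 hcsne]
      exact hm _ (List.getLast_mem hcsne)
    unfold pvDecA pvDecB
    rw [hsize]
    simp [hcsne, hlo, hhi]
  · -- exactly two distinct counts
    have hab : a ≠ b := by simp [List.nodup_cons] at hnd; tauto
    have ha : a ∈ vals := hmem' a (by simp)
    have hb : b ∈ vals := hmem' b (by simp)
    have hpa : 1 ≤ a := hpos a ha
    have hpb : 1 ≤ b := hpos b hb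
    have hca : 1 ≤ vals.count a := List.count_pos_iff.mpr ha
    have hcb : 1 ≤ vals.count b := List.count_pos_iff.mpr hb
    have hmem2 : ∀ x ∈ vals, x = a ∨ x = b := fun x hx => by simpa using hmem x hx
    unfold pvDecA
    rw [hsize, hitems]
    norm_num
    by_cases hlt : a < b
    · rw [pvSortedTwo vals a b hlt hmem2, pvTwo a b _ _ hlt hca hcb]
      split_ifs <;> first | rfl | omega
    · have hlt' : b < a := by omega
      rw [pvSortedTwo vals b a hlt' (fun x hx => (hmem2 x hx).symm),
        pvTwo b a _ _ hlt' hcb hca]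
      split_ifs <;> first | rfl | omega
  · -- three or more distinct counts: A returns "NO"; B's two endpoint tests cannot both hold
    have ha : a ∈ vals := hmem' a (by simp)
    have hb : b ∈ vals := hmem' b (by simp)
    have hc : c ∈ vals := hmem' c (by simp)
    have hdist : a ≠ b ∧ a ≠ c ∧ b ≠ c := by
      simp [List.nodup_cons] at hnd; tauto
    have hvne : vals ≠ [] := by intro h; subst h; simp at ha
    have hcsne : PySem.List.sorted vals (fun x => x) false ≠ [] := by
      rw [Ne, PySem.List.sorted_eq_nil_iff]; exact hvne
    have hmemcs : ∀ x ∈ vals, x ∈ PySem.List.sorted vals (fun x => x) false := by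
      intro x hx; exact (PySem.List.mem_sorted _ _ _ _).mpr hx
    have hlenpos : 0 < (PySem.List.sorted vals (fun x => x) false).length :=
      List.length_pos_iff.mpr hcsne
    have hmono : ∀ (p q : Nat) (hpq : p ≤ q) (hq : q < (PySem.List.sorted vals (fun x => x) false).length),
        (PySem.List.sorted vals (fun x => x) false)[p]'(Nat.lt_of_le_of_lt hpq hq)
          ≤ (PySem.List.sorted vals (fun x => x) false)[q]'hq := by
      intro p q hpq hq
      exact PySem.List.sorted_id_getElem_mono vals hpq hq
    have hlo : PySem.List.pyGetD (PySem.List.sorted vals (fun x => x) false) 0 0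
        = (PySem.List.sorted vals (fun x => x) false)[0]'hlenpos := by
      rw [PySem.List.pyGetD_eq_getElem _ 0 (by omega) (by exact_mod_cast hlenpos)]
      rfl
    have hhi : PySem.List.pyGetD (PySem.List.sorted vals (fun x => x) false) (-1) 0
        = (PySem.List.sorted vals (fun x => x) false)[(PySem.List.sorted vals (fun x => x) false).length - 1]'(by omega) := by
      rw [PySem.List.pyGetD_neg_one _ 0 hcsne, List.getLast_eq_getElem]
    set cs := PySem.List.sorted vals (fun x => x) false with hcsdef
    set lo := cs[0]'hlenpos with hlodef
    set hi := cs[cs.length - 1]'(by omega) with hhidef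
    have hbound : ∀ x ∈ cs, lo ≤ x ∧ x ≤ hi := by
      intro x hx
      obtain ⟨i, hilt, rfl⟩ := List.mem_iff_getElem.mp hx
      exact ⟨hmono 0 i (by omega) hilt, by simpa using hmono i (cs.length - 1) (by omega) (by omega)⟩
    have pigeon : ¬ (∀ x ∈ cs, x = lo ∨ x = hi) := by
      intro h
      rcases h a (hmemcs a ha) with h1 | h1 <;>
        rcases h b (hmemcs b hb) with h2 | h2 <;>
          rcases h c (hmemcs c hc) with h3 | h3 <;> omega
    have hlonehi : lo ≠ hi := by
      intro h
      apply pigeon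
      intro x hx
      have := hbound x hx
      left; omega
    unfold pvDecA pvDecB
    rw [hsize]
    rw [← hcsdef] at hhi hlo
    have hlen3 : 3 ≤ cs.length := by
      have h1 : ([a, b, c] : List Int).length ≤ vals.length := by
        refine (List.Nodup.subperm ?_ ?_).length_le
        · exact hnd.sublist (List.sublist_append_left [a, b, c] t)
        · intro x hx
          simp at hx
          rcases hx with rfl | rfl | rfl
          · exact ha
          · exact hb
          · exact hc
      have h2 : cs.length = vals.length := (PySem.List.sorted_perm _ _ _).length_eq
      simp at h1
      omega
    have hcond1 : ¬ (lo = 1 ∧ PySem.List.pyGetD cs 1 0 = hi) := by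
      rintro ⟨-, h1⟩
      rw [PySem.List.pyGetD_eq_getElem _ 0 (by omega) (by exact_mod_cast hlen3.trans_lt' (by omega))] at h1
      apply pigeon
      intro x hx
      obtain ⟨i, hilt, rfl⟩ := List.mem_iff_getElem.mp hx
      cases i with
      | zero => left; rfl
      | succ n =>
        right
        have h2 : cs[(1:Int).toNat]'(by omega) ≤ cs[n+1]'hilt := hmono (1:Int).toNat (n+1) (by omega) hilt
        have h3 := (hbound _ (List.getElem_mem hilt)).2
        omega
    have hcond2 : ¬ (hi = lo + 1 ∧ PySem.List.pyGetD cs (-2) 0 = lo) := by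
      rintro ⟨h1, -⟩
      apply pigeon
      intro x hx
      have := hbound x hx
      omega
    simp [hcsne, hlo, hhi, hlonehi, hcond1, hcond2]

-- ===== VERDICT (by name: the statement is the Claim_ definition above) =====
theorem valid_or_not_spec : Claim_equal_valid_or_not := by
  intro s _
  unfold Spec_valid_or_not
  rw [pvA_eq, pvB_eq, pvKey]
  intro v hv
  simp only [pvVals, List.mem_map] at hv
  obtain ⟨c, hc, rfl⟩ := hv
  have : c ∈ s.toList := (PySem.Set.mem_ofList _ _).mp hc
  have := List.count_pos_iff.mpr this
  omega
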